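-- pv_equiv track=rewrite | github.com/Moremar/advent_of_code_2018 | day02/script1.py | process
-- ===== SOURCE A (Python) =====
-- def calc_freqs(word):
--     freqs = {}
--     for l in word:
--         freqs[l] = freqs.get(l, 0) + 1
--     return freqs
--
-- def process(words):
--     x2, x3 = (0, 0)
--     for word in words:
--         f = calc_freqs(word)
--         if 2 in f.values():
--             x2 += 1
--         if 3 in f.values():
--             x3 += 1
--     return x2 * x3
-- ===== SOURCE B (Python) =====
-- def run_lengths(s):
--     # s must be sorted; returns the lengths of the maximal runs of equal items
--     runs = []
--     while s:
--         c = s[0]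
--         n = 0
--         while n < len(s) and s[n] == c:
--             n += 1
--         runs.append(n)
--         s = s[n:]
--     return runs
--
--
-- def process(words):
--     x2, x3 = (0, 0)
--     for word in words:
--         runs = run_lengths(sorted(word))
--         if 2 in runs:
--             x2 += 1
--         if 3 in runs:
--             x3 += 1
--     return x2 * x3
-- ===== Notes on version B (the rewrite author's own statement) =====
-- stated objective: alternative
-- what changed: Letter frequencies are computed by sorting each word and scanning it once for maximal runs of equal letters (run-length encoding), instead of building a hash-map counter and testing its values.
import Mathlib
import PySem

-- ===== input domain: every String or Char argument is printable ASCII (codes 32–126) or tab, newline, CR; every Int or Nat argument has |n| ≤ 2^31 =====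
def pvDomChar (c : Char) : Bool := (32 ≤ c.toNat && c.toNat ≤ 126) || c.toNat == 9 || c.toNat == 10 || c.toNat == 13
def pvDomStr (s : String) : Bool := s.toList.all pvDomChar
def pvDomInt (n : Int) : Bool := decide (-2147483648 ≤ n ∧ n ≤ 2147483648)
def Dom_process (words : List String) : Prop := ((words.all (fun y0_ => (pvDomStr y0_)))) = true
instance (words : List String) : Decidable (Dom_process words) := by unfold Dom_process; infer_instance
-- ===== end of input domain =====

-- B replaces A's hash-map letter counter by a sort-then-scan run-length pass over each word (alternative algorithm, same cost class).

-- ===== PORT A =====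
def calcFreqs (word : List Char) : PySem.Dict Char Int :=
  word.foldl (fun d l => d.insert l (d.getD l 0 + 1)) PySem.Dict.empty

def process (words : List String) : Int :=
  let p := words.foldl (fun (p : Int × Int) word =>
    let f := calcFreqs word.toList
    ((if (2 : Int) ∈ f.values then p.1 + 1 else p.1),
     (if (3 : Int) ∈ f.values then p.2 + 1 else p.2))) (0, 0)
  p.1 * p.2

-- ===== PORT B =====
-- the outer while of run_lengths; the inner while counts the leading elements equal to
-- s[0] (that count is 1 + length of the takeWhile on the tail), and s = s[n:] drops
-- exactly those leading elements (dropWhile on the tail)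
def runLengths (s : List Char) : List Nat :=
  match s with
  | [] => []
  | c :: rest =>
      (1 + (rest.takeWhile (· == c)).length) :: runLengths (rest.dropWhile (· == c))
termination_by s.length
decreasing_by
  simpa using Nat.lt_succ_of_le (List.length_dropWhile_le _ _)

def process_alt (words : List String) : Int :=
  let p := words.foldl (fun (p : Int × Int) word =>
    let runs := runLengths (PySem.List.sorted word.toList (fun c => c) false)
    ((if 2 ∈ runs then p.1 + 1 else p.1),
     (if 3 ∈ runs then p.2 + 1 else p.2))) (0, 0)
  p.1 * p.2

-- ===== PRECONDITION & SPEC =====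
def Spec_process (words : List String) (out : Int) : Prop := out = process_alt words
instance (words : List String) (out : Int) : Decidable (Spec_process words out) := by unfold Spec_process; infer_instance

-- ===== CLAIM (what is proved, stated in full; the proofs are below) =====
def Claim_equal_process : Prop := ∀ (words : List String), Dom_process words → Spec_process words (process words)

-- ===== LEMMAS AND PROOFS =====

-- A's dict-values membership is "some letter occurs exactly n times"
lemma mem_values_calcFreqs (w : List Char) (n : Nat) :
    ((n : Int) ∈ (calcFreqs w).values) ↔ ∃ c ∈ w, w.count c = n := by
  unfold calcFreqs
  rw [PySem.Dict.foldl_insert_getD_add_one_eq_counter]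
  simp only [PySem.Dict.values, PySem.Dict.items_counter, List.map_map, List.mem_map,
    Function.comp]
  constructor
  · rintro ⟨c, hc, h⟩
    exact ⟨c, (PySem.Set.mem_ofList _ _).1 hc, by exact_mod_cast h⟩
  · rintro ⟨c, hc, h⟩
    exact ⟨c, (PySem.Set.mem_ofList _ _).2 hc, by exact_mod_cast h⟩

-- B's run lengths on a sorted list are exactly the multiplicities
lemma mem_runLengths_of_sorted (s : List Char) (h : s.Pairwise (· ≤ ·)) (n : Nat) :
    n ∈ runLengths s ↔ ∃ c ∈ s, s.count c = n := by
  induction s using runLengths.induct with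
  | case1 => simp [runLengths]
  | case2 c rest ih =>
    set t := rest.takeWhile (· == c) with ht
    set d := rest.dropWhile (· == c) with hd
    have hrest : t ++ d = rest := List.takeWhile_append_dropWhile ..
    have htc : ∀ x ∈ t, x = c := fun x hx => by
      have := List.mem_takeWhile_imp hx; simpa using this
    have hrp : rest.Pairwise (· ≤ ·) := (List.pairwise_cons.1 h).2
    have hcle : ∀ x ∈ rest, c ≤ x := (List.pairwise_cons.1 h).1
    have hdp : d.Pairwise (· ≤ ·) := hrp.sublist (List.dropWhile_sublist _)
    have hcd : c ∉ d := by
      intro hc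
      obtain ⟨d0, dtl, hdeq⟩ := List.exists_cons_of_ne_nil (List.ne_nil_of_mem hc)
      have hp : (d0 == c) = false := by
        have hne : rest.dropWhile (· == c) ≠ [] := by rw [← hd, hdeq]; simp
        simpa [← hd, hdeq] using List.head_dropWhile_not (· == c) hne
      have hd0ne : d0 ≠ c := by simpa using hp
      have hd0mem : d0 ∈ rest := by
        rw [← hrest, hdeq]; exact List.mem_append_right _ (List.mem_cons_self ..)
      have h1 : c ≤ d0 := hcle _ hd0mem
      have hctl : c ∈ dtl := by
        rcases List.mem_cons.1 (hdeq ▸ hc) with h' | h'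
        · exact absurd h'.symm hd0ne
        · exact h'
      have h2 : d0 ≤ c := (List.pairwise_cons.1 (hdeq ▸ hdp)).1 _ hctl
      exact hd0ne (le_antisymm h2 h1)
    have hcount_c : (c :: rest).count c = 1 + t.length := by
      rw [List.count_cons_self, ← hrest, List.count_append]
      have h0 : d.count c = 0 := List.count_eq_zero.2 hcd
      have h1 : t.count c = t.length := List.count_eq_length.2 fun x hx => (htc x hx).symm
      omega
    have hcount_ne : ∀ c' ≠ c, (c :: rest).count c' = d.count c' := by
      intro c' hne
      have ht0 : t.count c' = 0 := List.count_eq_zero.2 fun hx => hne (htc _ hx)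
      rw [← hrest]
      simp [List.count_append, Ne.symm hne, ht0]
    rw [runLengths]
    simp only [List.mem_cons]
    constructor
    · rintro (rfl | hn)
      · exact ⟨c, by simp, by omega⟩
      · obtain ⟨c', hc', hcnt⟩ := (ih hdp).1 hn
        have hne : c' ≠ c := fun e => hcd (e ▸ hc')
        have hm : c' ∈ rest := by rw [← hrest]; exact List.mem_append_right _ hc'
        exact ⟨c', Or.inr hm, by rw [hcount_ne c' hne]; exact hcnt⟩
    · rintro ⟨c', hc', hcnt⟩
      by_cases hne : c' = c
      · subst hne; exact Or.inl (by rw [← hcnt]; exact hcount_c)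
      · right
        rcases hc' with rfl | hm
        · exact absurd rfl hne
        · have hcd' : c' ∈ d := by
            rw [← hrest] at hm
            rcases List.mem_append.1 hm with h1 | h1
            · exact absurd (htc _ h1) hne
            · exact h1
          exact (ih hdp).2 ⟨c', hcd', by rw [← hcount_ne c' hne]; exact hcnt⟩

-- per word, the two membership tests agree
lemma per_word (word : String) (n : Nat) :
    ((n : Int) ∈ (calcFreqs word.toList).values)
      ↔ n ∈ runLengths (PySem.List.sorted word.toList (fun c => c) false) := by
  have hpw : (PySem.List.sorted word.toList (fun c => c) false).Pairwise (· ≤ ·) := by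
    simpa using PySem.List.sorted_pairwise word.toList (fun c => c)
  have hp : (PySem.List.sorted word.toList (fun c => c) false).Perm word.toList :=
    PySem.List.sorted_perm word.toList (fun c => c) false
  rw [mem_values_calcFreqs, mem_runLengths_of_sorted _ hpw]
  constructor
  · rintro ⟨c, hc, hcnt⟩
    exact ⟨c, hp.mem_iff.2 hc, by rw [hp.count_eq]; exact hcnt⟩
  · rintro ⟨c, hc, hcnt⟩
    exact ⟨c, hp.mem_iff.1 hc, by rw [← hp.count_eq]; exact hcnt⟩

-- ===== VERDICT (by name: the statement is the Claim_ definition above) =====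
theorem process_spec : Claim_equal_process := by
  intro words _
  unfold Spec_process process process_alt
  have hstep : (fun (p : Int × Int) (word : String) =>
      let f := calcFreqs word.toList
      ((if (2 : Int) ∈ f.values then p.1 + 1 else p.1),
       (if (3 : Int) ∈ f.values then p.2 + 1 else p.2)))
    = (fun (p : Int × Int) (word : String) =>
      let runs := runLengths (PySem.List.sorted word.toList (fun c => c) false)
      ((if 2 ∈ runs then p.1 + 1 else p.1),
       (if 3 ∈ runs then p.2 + 1 else p.2))) := by
    funext p word
    have h2 := per_word word 2
    have h3 := per_word word 3
    norm_num at h2 h3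
    simp only [h2, h3]
  rw [hstep]
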